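-- pv_equiv track=rewrite | github.com/cmghoglund/text_analyzer | functions.py | find_longest_unique_words
-- ===== SOURCE A (Python) =====
-- def find_longest_unique_words(words: list):
--     unique_words = {}
--
--     for word in words:
--         # Check if the word is already in the dictionary
--         if word in unique_words:
--             continue
--
--         # If the word is not in the dictionary, add it with its length
--         unique_words[word] = len(word)
--
--     # Get the length of the longest word(s)
--     longest_word_length = max(unique_words.values())
--
--     # Get the longest unique words using a list comprehension
--     longest_unique_words = [word for word, length in unique_words.items() if length == longest_word_length]
--
--     return longest_word_length, longest_unique_words
-- ===== SOURCE B (Python) =====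
-- def find_longest_unique_words(words: list):
--     seen = set()
--     longest_len = -1
--     result = []
--     for word in words:
--         if word in seen:
--             continue
--         seen.add(word)
--         n = len(word)
--         if n > longest_len:
--             longest_len = n
--             result = [word]
--         elif n == longest_len:
--             result.append(word)
--     return longest_len, result
-- ===== Notes on version B (the rewrite author's own statement) =====
-- stated objective: simpler
-- what changed: Replaces the three passes (build a word->length dict, max over its values, filter the items) by one streaming pass over first occurrences that maintains a seen-set, the running maximum length and the current list of longest words.
import Mathlib
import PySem

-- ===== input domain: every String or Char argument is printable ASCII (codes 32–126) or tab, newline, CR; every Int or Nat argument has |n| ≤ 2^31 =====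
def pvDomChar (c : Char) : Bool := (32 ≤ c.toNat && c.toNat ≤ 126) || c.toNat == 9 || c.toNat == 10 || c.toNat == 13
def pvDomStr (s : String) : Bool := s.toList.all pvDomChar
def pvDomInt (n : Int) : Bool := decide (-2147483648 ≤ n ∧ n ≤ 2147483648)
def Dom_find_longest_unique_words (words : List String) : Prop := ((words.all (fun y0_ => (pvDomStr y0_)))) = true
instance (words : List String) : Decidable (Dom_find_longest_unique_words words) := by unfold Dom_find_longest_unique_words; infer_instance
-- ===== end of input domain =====

-- B replaces A's three passes (dict of first occurrences, max over values, filter) by one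
-- streaming pass keeping a seen-set, the running maximum length and the current longest words.

-- ===== PORT A =====
-- the dict-building loop of A: skip words already present, else store word -> len(word)
def pvStepA (d : PySem.Dict String Int) (word : String) : PySem.Dict String Int :=
  if d.contains word then d else d.insert word (PySem.Str.len word)

def find_longest_unique_words (words : List String) : Int × List String :=
  let unique_words := words.foldl pvStepA PySem.Dict.empty
  match PySem.List.max? unique_words.values (fun v => v) with
  | none => (0, [])  -- unreachable under Pre_: Python's max([]) raises ValueError on words = []
  | some longest_word_length =>
      (longest_word_length,
       (unique_words.items.filter (fun p => p.2 == longest_word_length)).map Prod.fst)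

-- ===== PORT B =====
-- one step of B's streaming loop over state (seen, longest_len, result)
def pvStepB (st : PySem.Set String × Int × List String) (word : String) :
    PySem.Set String × Int × List String :=
  if PySem.Set.contains st.1 word then st
  else
    let seen := PySem.Set.add st.1 word
    let n := PySem.Str.len word
    if n > st.2.1 then (seen, n, [word])
    else if n == st.2.1 then (seen, st.2.1, st.2.2 ++ [word])
    else (seen, st.2.1, st.2.2)

def find_longest_unique_words_alt (words : List String) : Int × List String :=
  (words.foldl pvStepB (PySem.Set.empty, -1, [])).2

-- ===== PRECONDITION & SPEC =====
-- Pre_ excludes only the empty list, on which A raises ValueError (max of an empty sequence).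
def Pre_find_longest_unique_words (words : List String) : Prop := words ≠ []
instance (words : List String) : Decidable (Pre_find_longest_unique_words words) := by unfold Pre_find_longest_unique_words; infer_instance

def pvWitness_find_longest_unique_words : List String := ["ab"]

def Spec_find_longest_unique_words (words : List String) (out : Int × List String) : Prop := out = find_longest_unique_words_alt words
instance (words : List String) (out : Int × List String) : Decidable (Spec_find_longest_unique_words words out) := by unfold Spec_find_longest_unique_words; infer_instance

-- ===== CLAIM (what is proved, stated in full; the proofs are below) =====
def Claim_equal_find_longest_unique_words : Prop := ∀ (words : List String), Dom_find_longest_unique_words words → Pre_find_longest_unique_words words → Spec_find_longest_unique_words words (find_longest_unique_words words)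

-- ===== LEMMAS AND PROOFS =====

-- max over a list extended on the right by one element
lemma pvMax?_append (xs : List Int) (y m : Int)
    (h : PySem.List.max? xs (fun v => v) = some m) :
    PySem.List.max? (xs ++ [y]) (fun v => v) = some (if m < y then y else m) := by
  unfold PySem.List.max? at h ⊢
  rw [List.foldl_append, h]
  simp only [List.foldl]
  split_ifs <;> rfl

-- the simultaneous-induction invariant: running B's loop from a state matching A's dict d
-- yields A's postprocessing of the final dict
lemma pvMain (ws : List String) (d : PySem.Dict String Int) (best : Int) (res : List String)
    (hnd : d.keys.Nodup)
    (hne : d.items = [] → ws ≠ [])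
    (hmax : (d.items = [] ∧ best = -1) ∨ PySem.List.max? d.values (fun v => v) = some best)
    (hres : res = (d.items.filter (fun p => p.2 == best)).map Prod.fst) :
    (ws.foldl pvStepB (d.keys, best, res)).2 =
      (match PySem.List.max? (ws.foldl pvStepA d).values (fun v => v) with
       | none => ((0 : Int), ([] : List String))
       | some m => (m, ((ws.foldl pvStepA d).items.filter (fun p => p.2 == m)).map Prod.fst)) := by
  induction ws generalizing d best res with
  | nil =>
    rcases hmax with ⟨h1, _⟩ | h2
    · exact absurd rfl (hne h1)
    · simp [h2, hres]
  | cons w t ih =>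
    by_cases hc : d.contains w = true
    · have hs : PySem.Set.contains d.keys w = true := by
        simpa [PySem.Set.contains, PySem.Dict.contains_eq_decide_mem_keys, List.contains_iff_mem]
          using hc
      have hmem : w ∈ d.keys := by
        simpa [PySem.Dict.contains_eq_decide_mem_keys] using hc
      simp only [List.foldl_cons, pvStepB, pvStepA, hs, hc, if_true]
      refine ih d best res hnd (fun hitems => ?_) hmax hres
      intro _
      rw [show d.keys = d.items.map Prod.fst from rfl, hitems] at hmem
      simp at hmem
    · have hc' : d.contains w = false := by simpa using hc
      have hmemn : w ∉ d.keys := by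
        simpa [PySem.Dict.contains_eq_decide_mem_keys] using hc'
      have hs : PySem.Set.contains d.keys w = false := by
        simp [PySem.Set.contains, hmemn]
      have hn0 : (0 : Int) ≤ PySem.Str.len w := by
        rw [PySem.Str.len_eq]; positivity
      set n := PySem.Str.len w with hn
      have hadd : PySem.Set.add d.keys w = (d.insert w n).keys := by
        rw [PySem.Dict.keys_insert_of_not_contains d n hc']
        unfold PySem.Set.add
        rw [hs]
        simp
      have hitems' : (d.insert w n).items = d.items ++ [(w, n)] :=
        PySem.Dict.items_insert_of_not_contains d n hc'
      have hvals' : (d.insert w n).values = d.values ++ [n] := by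
        simp [PySem.Dict.values, hitems']
      have hnd' : (d.insert w n).keys.Nodup := PySem.Dict.nodup_keys_insert d w n hnd
      have hne' : (d.insert w n).items = [] → t ≠ [] := by
        intro h; rw [hitems'] at h; simp at h
      simp only [List.foldl_cons, pvStepB, pvStepA, hs, hc', Bool.false_eq_true, if_false]
      by_cases hgt : n > best
      · -- strictly longer: both sides move to new maximum n with result [w]
        have hmax' : PySem.List.max? (d.insert w n).values (fun v => v) = some n := by
          rcases hmax with ⟨h1, _⟩ | h2
          · have : d.values = [] := by simp [PySem.Dict.values, h1]
            rw [hvals', this]; rfl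
          · rw [hvals', pvMax?_append d.values n best h2, if_pos hgt]
        have hfilt : d.items.filter (fun p => p.2 == n) = [] := by
          rcases hmax with ⟨h1, _⟩ | h2
          · simp [h1]
          · refine List.filter_eq_nil_iff.mpr (fun p hp => ?_)
            have hv : p.2 ∈ d.values := List.mem_map_of_mem hp
            have := PySem.List.max?_isMax h2 p.2 hv
            simp only [beq_iff_eq]
            omega
        have hres' : [w] = ((d.insert w n).items.filter (fun p => p.2 == n)).map Prod.fst := by
          rw [hitems', List.filter_append, hfilt]; simp
        have := ih (d.insert w n) n [w] hnd' hne' (Or.inr hmax') hres'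
        rw [hadd, if_pos hgt]
        exact this
      · have hle : n ≤ best := by omega
        have hbest : PySem.List.max? d.values (fun v => v) = some best := by
          rcases hmax with ⟨_, h1⟩ | h2
          · omega
          · exact h2
        have hmax' : PySem.List.max? (d.insert w n).values (fun v => v) = some best := by
          rw [hvals', pvMax?_append d.values n best hbest, if_neg (by omega)]
        by_cases heq : n = best
        · -- equally long: appended to the result on both sides
          have hres' : res ++ [w] =
              ((d.insert w n).items.filter (fun p => p.2 == best)).map Prod.fst := by
            rw [hitems', List.filter_append, List.map_append, ← hres]
            simp [heq]
          have := ih (d.insert w n) best (res ++ [w]) hnd' hne' (Or.inr hmax') hres'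
          rw [hadd, if_neg hgt, if_pos (by simp [heq] : (n == best) = true)]
          exact this
        · -- strictly shorter: dropped from the result on both sides
          have hres' : res = ((d.insert w n).items.filter (fun p => p.2 == best)).map Prod.fst := by
            rw [hitems', List.filter_append, List.map_append, ← hres]
            simp [heq]
          have := ih (d.insert w n) best res hnd' hne' (Or.inr hmax') hres'
          rw [hadd, if_neg hgt, if_neg (by simp [heq] : ¬ (n == best) = true)]
          exact this

-- ===== VERDICT (by name: the statement is the Claim_ definition above) =====
theorem find_longest_unique_words_spec : Claim_equal_find_longest_unique_words := by
  intro words _ hpre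
  unfold Spec_find_longest_unique_words find_longest_unique_words find_longest_unique_words_alt
  have h := pvMain words PySem.Dict.empty (-1) []
    (by simp [PySem.Dict.empty, PySem.Dict.keys])
    (fun _ => hpre) (Or.inl ⟨rfl, rfl⟩) rfl
  simpa [PySem.Dict.empty, PySem.Dict.keys, PySem.Set.empty] using h.symm
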